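-- pv_equiv track=rewrite | github.com/vagvaz/leads-query-processor-plugins | plugin-examples/adidas-processing-plugin/src/main/python/eu/leads/infext/python/articlecomment/domainanalysis.py | extract_first_and_last_tags
-- ===== SOURCE A (Python) =====
-- def extract_first_and_last_tags(path_list):
--     tag_pairs = {}
--
--     for path in path_list:
--         path_split = path.split('/')
--         first_tags = ''
--         last_tags = ''
--         tmp = []
--         for tag in path_split:
--             if '[' in tag:
--                 t = tag[:tag.index('[')]
--                 tmp.append(t)
--             else:
--                 tmp.append(tag)
--         path_split = tmp
--
--         if len(path_split) > 4:
--             first_tags = path_split[0] + '/' + path_split[1]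
--             last_tags = path_split[len(path_split) - 2] + '/' + path_split[len(path_split) - 1]
--
--         #creating a dictionary with keys as first_tags and values as list of last tags for corresponding first tag
--         # the list of last tags contains unique list of tags
--         if first_tags in tag_pairs.keys():
--             if last_tags not in tag_pairs[first_tags]:
--                 tag_pairs[first_tags].append(last_tags) #TODO:eleminated duplicates
--         else:
--             tag_pairs[first_tags] = []
--             tag_pairs[first_tags].append(last_tags)
--
--     return tag_pairs
-- ===== SOURCE B (Python) =====
-- def extract_first_and_last_tags(path_list):
--     # Phase 1: parse every path and collect ALL last-pairs per first-pair (duplicates kept).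
--     grouped = {}
--     for path in path_list:
--         parts = [t[:t.index('[')] if '[' in t else t for t in path.split('/')]
--         if len(parts) > 4:
--             first_tags = parts[0] + '/' + parts[1]
--             last_tags = parts[len(parts) - 2] + '/' + parts[len(parts) - 1]
--         else:
--             first_tags = ''
--             last_tags = ''
--         grouped.setdefault(first_tags, []).append(last_tags)
--     # Phase 2: dedupe each value list keeping first occurrences.
--     return {k: list(dict.fromkeys(v)) for k, v in grouped.items()}
-- ===== Notes on version B (the rewrite author's own statement) =====
-- stated objective: simpler
-- what changed: A dedups online with a membership test inside the main loop and per-key existence branching; B collects all (first,last) pairs with a branch-free setdefault-append pass and dedups each value list once at the end with dict.fromkeys.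
import Mathlib
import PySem

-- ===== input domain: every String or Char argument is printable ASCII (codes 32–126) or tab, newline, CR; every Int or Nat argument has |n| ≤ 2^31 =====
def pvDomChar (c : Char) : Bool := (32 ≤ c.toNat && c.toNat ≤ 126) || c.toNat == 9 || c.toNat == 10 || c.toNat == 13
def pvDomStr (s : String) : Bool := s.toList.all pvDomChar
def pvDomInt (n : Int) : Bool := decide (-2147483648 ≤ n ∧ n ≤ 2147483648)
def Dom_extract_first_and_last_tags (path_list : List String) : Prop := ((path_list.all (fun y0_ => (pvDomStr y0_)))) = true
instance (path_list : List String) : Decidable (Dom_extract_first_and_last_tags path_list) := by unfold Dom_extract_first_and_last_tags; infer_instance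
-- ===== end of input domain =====

-- B collects all (first,last) pairs with a branch-free setdefault-append pass and dedups each
-- value list once at the end, instead of A's online membership-tested dedup inside the main loop.

-- ===== PORT A =====
-- path.split('/'); sep = "/" is never empty, so split? is always `some` and getD [] is exact
def pvSplitSlash (path : String) : List String :=
  (PySem.Str.split? path "/").getD []

-- A's inner tag-cleaning loop: tmp.append(tag[:tag.index('[')]) if '[' in tag else tmp.append(tag)
def pvCleanLoopA (path_split : List String) : List String :=
  path_split.foldl
    (fun tmp tag =>
      if PySem.Str.isIn "[" tag then
        tmp ++ [PySem.Str.slice tag none (some (PySem.Str.find tag "["))]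
      else tmp ++ [tag]) []

-- per-path body of A's loop: the (first_tags, last_tags) pair
def pvParseA (path : String) : String × String :=
  let ps := pvCleanLoopA (pvSplitSlash path)
  if ps.length > 4 then
    (ps.getD 0 "" ++ "/" ++ ps.getD 1 "",
     ps.getD (ps.length - 2) "" ++ "/" ++ ps.getD (ps.length - 1) "")
  else ("", "")

def extract_first_and_last_tags (path_list : List String) : List (String × List String) :=
  (path_list.foldl
    (fun tag_pairs path =>
      let fl := pvParseA path
      if tag_pairs.contains fl.1 then
        if fl.2 ∈ tag_pairs.getD fl.1 [] then tag_pairs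
        else tag_pairs.modify fl.1 [] (· ++ [fl.2])
      else
        ((tag_pairs.insert fl.1 []).modify fl.1 [] (· ++ [fl.2])))
    PySem.Dict.empty).items

-- ===== PORT B =====
-- B's parse: a comprehension over the split, then the same len>4 first/last logic
def pvParseB (path : String) : String × String :=
  let parts := ((PySem.Str.split? path "/").getD []).map
    (fun t => if PySem.Str.isIn "[" t then PySem.Str.slice t none (some (PySem.Str.find t "[")) else t)
  if parts.length > 4 then
    (parts.getD 0 "" ++ "/" ++ parts.getD 1 "",
     parts.getD (parts.length - 2) "" ++ "/" ++ parts.getD (parts.length - 1) "")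
  else ("", "")

def extract_first_and_last_tags_alt (path_list : List String) : List (String × List String) :=
  (((path_list.map pvParseB).foldl
      (fun d p => d.modify p.1 [] (· ++ [p.2])) PySem.Dict.empty).items).map
    (fun p => (p.1, PySem.List.dedup p.2))

-- ===== PRECONDITION & SPEC =====
def Spec_extract_first_and_last_tags (path_list : List String) (out : List (String × List String)) : Prop := out = extract_first_and_last_tags_alt path_list
instance (path_list : List String) (out : List (String × List String)) : Decidable (Spec_extract_first_and_last_tags path_list out) := by unfold Spec_extract_first_and_last_tags; infer_instance

-- ===== CLAIM (what is proved, stated in full; the proofs are below) =====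
def Claim_equal_extract_first_and_last_tags : Prop := ∀ (path_list : List String), Dom_extract_first_and_last_tags path_list → Spec_extract_first_and_last_tags path_list (extract_first_and_last_tags path_list)

-- ===== LEMMAS AND PROOFS =====

theorem pvParseA_eq (path : String) : pvParseA path = pvParseB path := by
  unfold pvParseA pvParseB pvCleanLoopA pvSplitSlash
  rw [PySem.List.foldl_congr_mem _ _
        (fun tmp tag => tmp ++ [if PySem.Str.isIn "[" tag then
            PySem.Str.slice tag none (some (PySem.Str.find tag "[")) else tag]) _
        (fun acc x _ => by
          show _ = acc ++ [if PySem.Str.isIn "[" x then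
            PySem.Str.slice x none (some (PySem.Str.find x "[")) else x]
          split <;> rfl),
      PySem.List.foldl_append_singleton_eq_map]
  simp

-- A's per-pair step, with the parse factored out
def pvStepA (d : PySem.Dict String (List String)) (p : String × String) : PySem.Dict String (List String) :=
  if d.contains p.1 then
    if p.2 ∈ d.getD p.1 [] then d else d.modify p.1 [] (· ++ [p.2])
  else ((d.insert p.1 []).modify p.1 [] (· ++ [p.2]))

theorem pvStepA_keys (d : PySem.Dict String (List String)) (p : String × String) :
    (pvStepA d p).keys = PySem.Set.add d.keys p.1 := by
  unfold pvStepA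
  by_cases h : d.contains p.1 = true
  · have hm : p.1 ∈ d.keys := (PySem.Dict.contains_iff_mem_keys d p.1).1 h
    rw [PySem.Set.add_of_mem hm]
    simp only [h, if_true]
    split
    · rfl
    · rw [PySem.Dict.keys_modify, PySem.Dict.keys_insert_of_contains d _ h]
  · have h' : d.contains p.1 = false := by simpa using h
    have hm : p.1 ∉ d.keys := fun hmem =>
      absurd ((PySem.Dict.contains_iff_mem_keys d p.1).2 hmem) (by simp [h'])
    rw [PySem.Set.add_of_not_mem hm]
    simp only [h', Bool.false_eq_true, if_false]
    rw [PySem.Dict.keys_modify, PySem.Dict.insert_insert_self,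
        PySem.Dict.keys_insert_of_not_contains d _ h']

theorem pvStepA_getD (d : PySem.Dict String (List String)) (p : String × String) (k : String) :
    (pvStepA d p).getD k [] =
      if p.1 = k then PySem.Set.add (d.getD k []) p.2 else d.getD k [] := by
  unfold pvStepA
  by_cases h : d.contains p.1 = true
  · simp only [h, if_true]
    by_cases hmem : p.2 ∈ d.getD p.1 []
    · simp only [hmem, if_pos]
      rcases eq_or_ne p.1 k with rfl | hne
      · simp [PySem.Set.add_of_mem hmem]
      · simp [hne]
    · simp only [hmem, if_neg, not_false_iff]
      rw [PySem.Dict.getD_modify]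
      rcases eq_or_ne p.1 k with rfl | hne
      · simp [PySem.Set.add_of_not_mem hmem]
      · simp [hne, Ne.symm hne]
  · have h' : d.contains p.1 = false := by simpa using h
    simp only [h', Bool.false_eq_true, if_false]
    rw [PySem.Dict.getD_modify]
    rcases eq_or_ne p.1 k with rfl | hne
    · rw [PySem.Dict.getD_of_not_contains d _ h']
      simp [PySem.Dict.getD_insert_self, PySem.Set.add]
    · rw [PySem.Dict.getD_insert_of_ne d _ _ (Ne.symm hne)]
      simp [Ne.symm hne, hne]

theorem pvStepA_nodup (d : PySem.Dict String (List String)) (p : String × String)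
    (h : d.keys.Nodup) : (pvStepA d p).keys.Nodup := by
  rw [pvStepA_keys]; exact PySem.Set.nodup_add _ _ h

theorem pvFoldA_inv (l : List (String × String)) (d : PySem.Dict String (List String))
    (h : d.keys.Nodup) :
    (l.foldl pvStepA d).keys = PySem.Set.update d.keys (l.map (·.1)) ∧
    (l.foldl pvStepA d).keys.Nodup ∧
    ∀ k, (l.foldl pvStepA d).getD k [] =
      PySem.Set.update (d.getD k []) ((l.filter (fun p => p.1 == k)).map (·.2)) := by
  induction l generalizing d with
  | nil => simp [PySem.Set.update, h]
  | cons p l ih =>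
    obtain ⟨h1, h2, h3⟩ := ih (pvStepA d p) (pvStepA_nodup d p h)
    refine ⟨?_, by simpa using h2, ?_⟩
    · simpa [pvStepA_keys, PySem.Set.update_cons] using h1
    · intro k
      have := h3 k
      simp only [List.foldl_cons] at this ⊢
      rw [this, pvStepA_getD]
      rcases eq_or_ne p.1 k with rfl | hne
      · simp [PySem.Set.update_cons]
      · simp [hne]

-- ===== VERDICT (by name: the statement is the Claim_ definition above) =====
theorem extract_first_and_last_tags_spec : Claim_equal_extract_first_and_last_tags := by
  intro path_list _
  show extract_first_and_last_tags path_list = extract_first_and_last_tags_alt path_list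
  unfold extract_first_and_last_tags extract_first_and_last_tags_alt
  have hA : path_list.foldl
      (fun tag_pairs path =>
        let fl := pvParseA path
        if tag_pairs.contains fl.1 then
          if fl.2 ∈ tag_pairs.getD fl.1 [] then tag_pairs
          else tag_pairs.modify fl.1 [] (· ++ [fl.2])
        else ((tag_pairs.insert fl.1 []).modify fl.1 [] (· ++ [fl.2])))
      (PySem.Dict.empty : PySem.Dict String (List String)) =
      (path_list.map pvParseB).foldl pvStepA PySem.Dict.empty := by
    rw [List.foldl_map]
    exact PySem.List.foldl_congr_mem _ _ _ _
      (fun acc x _ => by simp [pvStepA, pvParseA_eq])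
  rw [hA]
  set pairs := path_list.map pvParseB with hp
  obtain ⟨hAkeys, hAnodup, hAgetD⟩ :=
    pvFoldA_inv pairs (PySem.Dict.empty : PySem.Dict String (List String)) (by simp)
  set dA := pairs.foldl pvStepA (PySem.Dict.empty : PySem.Dict String (List String)) with hdA
  set dB := pairs.foldl (fun d p => d.modify p.1 [] (· ++ [p.2]))
      (PySem.Dict.empty : PySem.Dict String (List String)) with hdB
  have hBnodup : dB.keys.Nodup :=
    PySem.Dict.nodup_keys_foldl_modify_key pairs (·.1) [] (fun _ p => (· ++ [p.2])) _ (by simp)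
  have hBkeys : dB.keys = PySem.Set.update ([] : List String) (pairs.map (·.1)) := by
    simpa using PySem.Dict.keys_foldl_modify_key pairs (·.1) ([] : List String)
      (fun _ p => (· ++ [p.2])) (PySem.Dict.empty : PySem.Dict String (List String))
  have hBgetD : ∀ k, dB.getD k [] = (pairs.filter (fun p => p.1 == k)).map (·.2) := by
    intro k
    simpa using PySem.Dict.getD_foldl_modify_append pairs
      (PySem.Dict.empty : PySem.Dict String (List String)) k
  have hkeys : dA.keys = dB.keys := by
    rw [hAkeys, hBkeys]; simp
  rw [PySem.Dict.items_eq_map_keys dA hAnodup [],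
      PySem.Dict.items_eq_map_keys dB hBnodup [],
      List.map_map, hkeys]
  refine List.map_congr_left (fun k _ => ?_)
  simp only [Function.comp]
  rw [hAgetD k, hBgetD k]
  simp [PySem.Set.update_nil_left]
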